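-- pv_equiv track=rewrite | github.com/GFrosi/Comparing_Databases_GEO | compare_dbs_prediction/main_dbs.py | consensus_col
-- ===== SOURCE A (Python) =====
-- from collections import Counter
--
-- def consensus_col(dbs: list) -> str:
--     """Receives a list of targets
--     and retuns a string if the majority
--     agree/disagree among them"""
--
--     #cleaning list to check conditions
--     to_filter = ['----', 'unclassified']
--     clean_dbs = [ele for ele in dbs if ele not in to_filter]
--     threshold = len(clean_dbs)/2
--
--     #counter dict for each term in the cleaning list
--     dict_counter = Counter(clean_dbs)
--
--     #checking conditions #to get the consensus target: get the higher v and print k (target)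
--     for k,v in dict_counter.items():
--         if v > threshold:
--
--             return 'Consensus'
--
--     return 'No_consensus'
-- ===== SOURCE B (Python) =====
-- def consensus_col(dbs: list) -> str:
--     """Receives a list of targets
--     and retuns a string if the majority
--     agree/disagree among them"""
--     to_filter = ('----', 'unclassified')
--     clean = [e for e in dbs if e not in to_filter]
--     if not clean:
--         return 'No_consensus'
--     # Boyer-Moore majority vote: the only element that can exceed half ends as candidate
--     candidate, count = clean[0], 1
--     for e in clean[1:]:
--         if count == 0:
--             candidate, count = e, 1
--         elif e == candidate:
--             count += 1
--         else:
--             count -= 1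
--     return 'Consensus' if 2 * clean.count(candidate) > len(clean) else 'No_consensus'
-- ===== Notes on version B (the rewrite author's own statement) =====
-- stated objective: alternative
-- what changed: Replaces the Counter dictionary and the scan over its items by a Boyer-Moore majority vote over the filtered list followed by a single count of the one possible majority candidate.
import Mathlib
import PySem

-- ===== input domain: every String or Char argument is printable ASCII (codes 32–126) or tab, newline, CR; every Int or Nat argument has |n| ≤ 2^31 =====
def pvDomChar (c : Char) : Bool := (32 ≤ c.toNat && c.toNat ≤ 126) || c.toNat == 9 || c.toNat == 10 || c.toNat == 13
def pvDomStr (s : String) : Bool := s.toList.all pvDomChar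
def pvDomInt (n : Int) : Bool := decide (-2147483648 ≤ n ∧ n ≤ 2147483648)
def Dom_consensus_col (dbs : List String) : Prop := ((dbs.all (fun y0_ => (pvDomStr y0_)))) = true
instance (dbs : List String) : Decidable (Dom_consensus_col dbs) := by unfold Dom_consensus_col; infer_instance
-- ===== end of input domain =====

-- B replaces A's Counter dict and items scan by a Boyer-Moore majority vote plus one final count (alternative algorithm, same cost).

-- ===== PORT A =====
-- the early-returning 'for k,v in dict_counter.items()' loop
def consensusLoop : List (String × Int) → Int → String
  | [], _ => "No_consensus"
  | (_, v) :: rest, n => if 2 * v > n then "Consensus" else consensusLoop rest n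

def consensus_col (dbs : List String) : String :=
  let to_filter : List String := ["----", "unclassified"]
  let clean_dbs := dbs.filter (fun ele => !to_filter.contains ele)
  -- threshold = len(clean_dbs)/2 is a Python float; the loop's test 'v > threshold' is ported
  -- exactly as '2*v > len' (exact: v and len are integers well below 2^52, where float halving is exact)
  let dict_counter := PySem.Dict.counter clean_dbs
  consensusLoop dict_counter.items (clean_dbs.length : Int)

-- ===== PORT B =====
def bmStep (s : String × Int) (e : String) : String × Int :=
  if s.2 == 0 then (e, 1)
  else if e == s.1 then (s.1, s.2 + 1)
  else (s.1, s.2 - 1)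

def consensus_col_alt (dbs : List String) : String :=
  let to_filter : List String := ["----", "unclassified"]
  let clean := dbs.filter (fun e => !to_filter.contains e)
  match clean with
  | [] => "No_consensus"
  | c :: rest =>
    let s := rest.foldl bmStep (c, 1)
    if 2 * (((c :: rest).count s.1 : Nat) : Int) > ((c :: rest).length : Int) then "Consensus"
    else "No_consensus"

-- ===== PRECONDITION & SPEC =====
def Spec_consensus_col (dbs : List String) (out : String) : Prop := out = consensus_col_alt dbs
instance (dbs : List String) (out : String) : Decidable (Spec_consensus_col dbs out) := by unfold Spec_consensus_col; infer_instance

-- ===== CLAIM (what is proved, stated in full; the proofs are below) =====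
def Claim_equal_consensus_col : Prop := ∀ (dbs : List String), Dom_consensus_col dbs → Spec_consensus_col dbs (consensus_col dbs)

-- ===== LEMMAS AND PROOFS =====

-- Boyer-Moore invariant: the vote count is nonnegative, every non-candidate occurs at most
-- (len - cnt)/2 times, and the candidate at most (len + cnt)/2 times.
def BMInv (l : List String) (s : String × Int) : Prop :=
  0 ≤ s.2 ∧ (∀ x, x ≠ s.1 → 2 * (l.count x : Int) + s.2 ≤ (l.length : Int)) ∧
    2 * (l.count s.1 : Int) ≤ (l.length : Int) + s.2

lemma bmStep_inv {l : List String} {s : String × Int} (h : BMInv l s) (e : String) :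
    BMInv (l ++ [e]) (bmStep s e) := by
  obtain ⟨h0, hne, hc⟩ := h
  have hce : (l ++ [e]).count e = l.count e + 1 := by simp [List.count_append]
  have hcne : ∀ x : String, x ≠ e → (l ++ [e]).count x = l.count x := by
    intro x hx; simp [List.count_append, List.count_cons, Ne.symm hx]
  have hlen : (l ++ [e]).length = l.length + 1 := by simp
  unfold bmStep BMInv
  by_cases hz : s.2 = 0
  · rw [if_pos (by simp [hz])]
    dsimp only
    refine ⟨by norm_num, ?_, ?_⟩
    · intro x hx
      have h2 := hcne x hx
      by_cases hxs : x = s.1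
      · subst hxs; omega
      · have := hne x hxs; omega
    · by_cases hes : e = s.1
      · rw [← hes] at hc; omega
      · have := hne e hes; omega
  · rw [if_neg (by simp [hz])]
    by_cases hes : e = s.1
    · rw [if_pos (by simp [hes])]
      dsimp only
      refine ⟨by omega, ?_, ?_⟩
      · intro x hx
        have hxe : x ≠ e := by rw [hes]; exact hx
        have h2 := hcne x hxe
        have := hne x hx
        omega
      · rw [← hes] at hc ⊢; omega
    · rw [if_neg (by simp [hes])]
      dsimp only
      refine ⟨by omega, ?_, ?_⟩
      · intro x hx
        by_cases hxe : x = e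
        · subst hxe; have := hne x hes; omega
        · have h2 := hcne x hxe; have := hne x hx; omega
      · have h2 := hcne s.1 (fun h => hes h.symm); omega

lemma bm_fold_inv : ∀ (rest : List String) (s : String × Int) (l : List String),
    BMInv l s → BMInv (l ++ rest) (rest.foldl bmStep s) := by
  intro rest
  induction rest with
  | nil => intro s l h; simpa using h
  | cons e t ih =>
    intro s l h
    have := ih (bmStep s e) (l ++ [e]) (bmStep_inv h e)
    simpa [List.append_assoc] using this

lemma bm_init (c : String) : BMInv [c] (c, 1) := by
  refine ⟨by norm_num, ?_, ?_⟩
  · intro x hx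
    have hx' : x ≠ c := hx
    have h0 : [c].count x = 0 := by simp [List.count_cons, Ne.symm hx']
    rw [h0]; simp
  · simp

-- if some element holds a strict majority, it is the final Boyer-Moore candidate
lemma bm_majority {c : String} {rest : List String} {m : String}
    (h : ((c :: rest).length : Int) < 2 * ((c :: rest).count m : Int)) :
    (rest.foldl bmStep (c, 1)).1 = m := by
  have hinv : BMInv (c :: rest) (rest.foldl bmStep (c, 1)) := by
    have := bm_fold_inv rest (c, 1) [c] (bm_init c)
    simpa using this
  obtain ⟨h0, hne, _⟩ := hinv
  by_contra hmc
  have := hne m (fun h' => hmc h'.symm)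
  omega

-- A's loop is the 'any' of its test over the items
lemma consensusLoop_eq_any (items : List (String × Int)) (n : Int) :
    consensusLoop items n =
      if items.any (fun kv => 2 * kv.2 > n) then "Consensus" else "No_consensus" := by
  induction items with
  | nil => simp [consensusLoop]
  | cons kv rest ih =>
    obtain ⟨k, v⟩ := kv
    rw [show consensusLoop ((k, v) :: rest) n
        = if 2 * v > n then "Consensus" else consensusLoop rest n from rfl]
    by_cases h : 2 * v > n
    · simp [h]
    · rw [if_neg h, ih]
      simp only [List.any_cons]
      simp only [decide_eq_false h, Bool.false_or]

-- the two programs agree on any (already filtered) list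
lemma core (clean : List String) :
    consensusLoop (PySem.Dict.counter clean).items (clean.length : Int) =
    (match clean with
     | [] => "No_consensus"
     | c :: rest =>
       if 2 * (((c :: rest).count (rest.foldl bmStep (c, 1)).1 : Nat) : Int)
           > ((c :: rest).length : Int) then "Consensus" else "No_consensus") := by
  rw [consensusLoop_eq_any, PySem.Dict.items_counter]
  cases clean with
  | nil => simp [PySem.Set.ofList]
  | cons c rest =>
    simp only [List.any_map, Function.comp_def]
    have key : ((PySem.Set.ofList (c :: rest)).any
        (fun k => decide (2 * ((List.count k (c :: rest) : Nat) : Int) > ((c :: rest).length : Int))))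
        = decide (2 * (((c :: rest).count (rest.foldl bmStep (c, 1)).1 : Nat) : Int)
            > ((c :: rest).length : Int)) := by
      by_cases hB : 2 * (((c :: rest).count (rest.foldl bmStep (c, 1)).1 : Nat) : Int)
          > ((c :: rest).length : Int)
      · rw [decide_eq_true hB, List.any_eq_true]
        refine ⟨(rest.foldl bmStep (c, 1)).1, ?_, by simpa using hB⟩
        have hpos : 0 < (c :: rest).count (rest.foldl bmStep (c, 1)).1 := by omega
        exact (PySem.Set.mem_ofList _ _).2 (List.count_pos_iff.1 hpos)
      · rw [decide_eq_false hB, List.any_eq_false]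
        intro k _
        simp only [decide_eq_true_eq]
        intro hk
        have hmaj := bm_majority (c := c) (rest := rest) (m := k) (by omega)
        rw [hmaj] at hB
        exact hB (by omega)
    rw [key]
    simp

-- ===== VERDICT (by name: the statement is the Claim_ definition above) =====
theorem consensus_col_spec : Claim_equal_consensus_col := by
  intro dbs _
  have hA : consensus_col dbs = consensusLoop
      (PySem.Dict.counter (dbs.filter (fun e => !(["----", "unclassified"] : List String).contains e))).items
      ((dbs.filter (fun e => !(["----", "unclassified"] : List String).contains e)).length : Int) := rfl
  have hB : consensus_col_alt dbs =
      (match dbs.filter (fun e => !(["----", "unclassified"] : List String).contains e) with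
       | [] => "No_consensus"
       | c :: rest =>
         if 2 * (((c :: rest).count (rest.foldl bmStep (c, 1)).1 : Nat) : Int)
             > ((c :: rest).length : Int) then "Consensus" else "No_consensus") := rfl
  show consensus_col dbs = consensus_col_alt dbs
  rw [hA, hB]
  exact core _
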